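-- pv_equiv track=rewrite | github.com/RUSLANBALTABAEV/Programming_tasks-Abramov---Programming-tasks- | CHAPTER_1-BASIC_PROGRAMMING_TECHNIQUES/Combinations of loops and branching/225.py | get_q_numbers_factorization
-- ===== SOURCE A (Python) =====
-- def get_q_numbers_factorization(n):
--     """Решение через разложение на простые множители (эффективный метод)"""
--     # Функция для разложения числа на простые множители
--     def factorize(num):
--         factors = {}
--         d = 2
--         while d * d <= num:
--             while num % d == 0:
--                 factors[d] = factors.get(d, 0) + 1
--                 num //= d
--             d += 1 if d == 2 else 2  # пропускаем четные после 2
--         if num > 1: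
--             factors[num] = factors.get(num, 0) + 1
--         return factors
--
--     # Разложение n на простые множители
--     factors = factorize(n)
--
--     # Если n=1, то результат пустой
--     if not factors:
--         return []
--
--     # Получаем списки простых чисел и их степеней
--     primes = list(factors.keys())
--     exponents = list(factors.values())
--     k = len(primes)
--
--     # Максимальные значения a_i (показателей в q)
--     max_a = [e // 2 for e in exponents]  # т.к. q^2 делит n => 2a_i ≤ e_i => a_i ≤ e_i/2
--
--     result = []
--
--     # Рекурсивная функция для перебора всех возможных q
--     def generate_q(index, current_q, current_a):
--         if index == k:
--             # Проверяем условие: существует ли i, такое что 3*a_i > e_i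
--             condition_met = any(3 * current_a[i] > exponents[i] for i in range(k))
--             if condition_met:
--                 result.append(current_q)
--             return
--
--         prime = primes[index]
--         max_a_i = max_a[index]
--
--         # Перебираем все возможные a_i от 0 до max_a_i
--         for a in range(max_a_i + 1):
--             # Вычисляем новый q
--             new_q = current_q * (prime ** a)
--             # Создаем копию списка current_a с добавлением a
--             new_a = current_a[:]
--             new_a.append(a)
--             # Рекурсивный вызов для следующего простого числа
--             generate_q(index + 1, new_q, new_a)
--
--     # Начинаем рекурсию
--     generate_q(0, 1, [])
--
--     # Удаляем q=1 (если он есть), т.к. для него условие не выполняется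
--     if 1 in result:
--         result.remove(1)
--
--     # Сортируем результат
--     result.sort()
--     return result
-- ===== SOURCE B (Python) =====
-- def get_q_numbers_factorization(n):
--     """Same divisors q (q*q | n, some 3*a_i > e_i): flat two-phase version.
--     Phase 1 builds the ordered list of (prime, exponent) pairs directly (no dict);
--     phase 2 expands candidates iteratively, carrying a condition flag, so the
--     recursive generate_q, the exponent list and the remove(1) step disappear."""
--     pairs = []
--     num = n
--     d = 2
--     while d * d <= num:
--         e = 0
--         while num % d == 0:
--             num //= d
--             e += 1
--         if e:
--             pairs.append((d, e))
--         d = 3 if d == 2 else d + 2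
--     if num > 1:
--         pairs.append((num, 1))
--
--     cands = [(1, False)]
--     for p, e in pairs:
--         cands = [(q * p ** a, ok or 3 * a > e)
--                  for q, ok in cands
--                  for a in range(e // 2 + 1)]
--     return sorted(q for q, ok in cands if ok)
-- ===== Notes on version B (the rewrite author's own statement) =====
-- stated objective: alternative
-- what changed: A's dict-based factorize and recursive generate_q (index, accumulated exponent list, any()-check at each leaf, then remove(1)) are replaced by a flat two-phase program: a loop that builds the ordered (prime, exponent) pair list directly with a counted inner strip (no dict), then one fold over those pairs that rebuilds a flat list of (q, condition-met flag) candidates, so the leaf any(), the a-list and the dead remove(1) step disappear and the result is a single sorted comprehension.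
import Mathlib
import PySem

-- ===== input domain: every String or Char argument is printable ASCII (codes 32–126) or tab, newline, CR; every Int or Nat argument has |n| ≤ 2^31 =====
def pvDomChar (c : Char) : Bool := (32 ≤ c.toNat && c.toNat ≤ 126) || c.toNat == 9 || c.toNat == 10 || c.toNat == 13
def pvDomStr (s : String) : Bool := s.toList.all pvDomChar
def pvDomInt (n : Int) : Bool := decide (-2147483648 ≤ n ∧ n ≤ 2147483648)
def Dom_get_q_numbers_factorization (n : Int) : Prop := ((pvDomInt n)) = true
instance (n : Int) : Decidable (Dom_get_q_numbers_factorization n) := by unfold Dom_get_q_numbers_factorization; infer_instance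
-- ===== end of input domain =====

-- B replaces A's dict-based factorize and recursive generate_q (index + exponent list +
-- any() at each leaf + remove(1)) by a flat two-phase program: an ordered (prime, exponent)
-- pair list built directly with a counted strip loop, then an iterative candidate fold
-- carrying a condition flag; same return value, similar cost (objective: alternative).

-- ===== PORT A =====
-- inner loop `while num % d == 0: factors[d] = factors.get(d, 0) + 1; num //= d`.
-- The conjuncts `0 < num ∧ 2 ≤ d` are totality guards only: every call from pvFactLoop
-- has d*d ≤ num and 2 ≤ d, hence 0 < num, and both are preserved by the recursion.
-- termination bound for the division loops (cited by the recursions below)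
theorem pvFloordiv_lt (num d : Int) (h2 : 0 < num) (h3 : 2 ≤ d) :
    PySem.Int.floordiv num d < num ∧ 0 ≤ PySem.Int.floordiv num d := by
  rw [PySem.Int.floordiv_eq_ediv_of_pos (by omega)]
  exact ⟨Int.ediv_lt_of_lt_mul (by omega) (by nlinarith), Int.ediv_nonneg (by omega) (by omega)⟩

-- the two termination obligations, packaged so each decreasing_by is one application
theorem pvStrip_dec (num d : Int)
    (h : PySem.Int.mod num d = 0 ∧ 0 < num ∧ 2 ≤ d) :
    (PySem.Int.floordiv num d).toNat < num.toNat := by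
  have := pvFloordiv_lt num d h.2.1 h.2.2
  omega

theorem pvOuter_dec (num d x s : Int) (hx : x ≤ num)
    (hds : d < s) (h : d * d ≤ num ∧ 2 ≤ d) :
    (x + 1 - s).toNat < (num + 1 - d).toNat := by
  obtain ⟨h1, h2⟩ := h
  have h4 : d ≤ d * d := le_mul_of_one_le_left (by omega) (by omega)
  omega

def pvDivOut (num d : Int) (factors : PySem.Dict Int Int) : Int × PySem.Dict Int Int :=
  if _h : PySem.Int.mod num d = 0 ∧ 0 < num ∧ 2 ≤ d then
    pvDivOut (PySem.Int.floordiv num d) d (factors.insert d (factors.getD d 0 + 1))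
  else (num, factors)
termination_by num.toNat
decreasing_by exact pvStrip_dec num d _h

-- the port (pvFactLoop) needs this bound for termination, so it stays above it
theorem pvDivOut_fst_le (num d : Int) (factors : PySem.Dict Int Int) :
    (pvDivOut num d factors).1 ≤ num := by
  induction num, factors using pvDivOut.induct d with
  | case1 num factors h ih =>
    rw [pvDivOut, dif_pos h]
    have := pvFloordiv_lt num d h.2.1 h.2.2
    omega
  | case2 num factors h => rw [pvDivOut, dif_neg h]

-- outer loop `while d * d <= num: … ; d += 1 if d == 2 else 2`.
-- The conjunct `2 ≤ d` is a totality guard only: d starts at 2 and only grows.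
def pvFactLoop (num d : Int) (factors : PySem.Dict Int Int) : Int × PySem.Dict Int Int :=
  if h : d * d ≤ num ∧ 2 ≤ d then
    let r := pvDivOut num d factors
    pvFactLoop r.1 (d + if d = 2 then 1 else 2) r.2
  else (num, factors)
termination_by (num + 1 - d).toNat
decreasing_by
  exact pvOuter_dec num d _ _ (pvDivOut_fst_le num d factors) (by split <;> omega) h

def pvFactorize (num : Int) : PySem.Dict Int Int :=
  let r := pvFactLoop num 2 PySem.Dict.empty
  if 1 < r.1 then r.2.insert r.1 (r.2.getD r.1 0 + 1) else r.2

-- A's recursive generate_q; the walk over `index = 0 .. k` is the structural recursion over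
-- the list (primes zip max_a); `exponents` and `current_a` are exactly A's lists, and
-- `k = len(primes) = exponents.length` (the two lists of one dict have equal length).
def pvGenQ (pes : List (Int × Int)) (exponents : List Int) (current_q : Int)
    (current_a : List Int) : List Int :=
  match pes with
  | [] =>
      -- any(3 * current_a[i] > exponents[i] for i in range(k)); indices are in range
      if (PySem.List.pyRange 0 (exponents.length : Int) 1).any
          (fun i => decide (3 * PySem.List.pyGetD current_a i 0 > PySem.List.pyGetD exponents i 0))
        then [current_q] else []
  | (prime, max_a_i) :: rest =>
      -- for a in range(max_a_i + 1): … result.append happens in recursion leaves, in order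
      (PySem.List.pyRange 0 (max_a_i + 1) 1).foldl
        (fun res a => res ++ pvGenQ rest exponents (current_q * prime ^ a.toNat)
          (current_a ++ [a])) []

def get_q_numbers_factorization (n : Int) : List Int :=
  let factors := pvFactorize n
  if factors.items = [] then []          -- `if not factors: return []`
  else
    let primes := factors.keys
    let exponents := factors.values
    let max_a := exponents.map (fun e => PySem.Int.floordiv e 2)
    let result := pvGenQ (primes.zip max_a) exponents 1 []
    -- `if 1 in result: result.remove(1)`; the getD branch is unreachable under the contains guard
    let result := if result.contains 1 then (PySem.List.remove? result 1).getD result else result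
    PySem.List.sorted result (fun x => x) false

-- ===== PORT B =====
-- inner loop `while num % d == 0: num //= d; e += 1` of Source B; the conjuncts
-- `0 < num ∧ 2 ≤ d` are totality guards only (every call from pvFactB satisfies them).
def pvStripB (num d e : Int) : Int × Int :=
  if _h : PySem.Int.mod num d = 0 ∧ 0 < num ∧ 2 ≤ d then
    pvStripB (PySem.Int.floordiv num d) d (e + 1)
  else (num, e)
termination_by num.toNat
decreasing_by exact pvStrip_dec num d _h

-- bound needed by pvFactB's termination
theorem pvStripB_fst_le (num d e : Int) : (pvStripB num d e).1 ≤ num := by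
  induction num, e using pvStripB.induct d with
  | case1 num e h ih =>
    rw [pvStripB, dif_pos h]
    have := pvFloordiv_lt num d h.2.1 h.2.2
    omega
  | case2 num e h => rw [pvStripB, dif_neg h]

-- phase 1 of Source B: `while d * d <= num: e-strip; if e: pairs.append((d, e)); d = 3 if d == 2 else d + 2`
def pvFactB (num d : Int) (pairs : List (Int × Int)) : Int × List (Int × Int) :=
  if _h : d * d ≤ num ∧ 2 ≤ d then
    let r := pvStripB num d 0
    pvFactB r.1 (if d = 2 then 3 else d + 2) (if r.2 ≠ 0 then pairs ++ [(d, r.2)] else pairs)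
  else (num, pairs)
termination_by (num + 1 - d).toNat
decreasing_by exact pvOuter_dec num d _ _ (pvStripB_fst_le num d 0) (by split <;> omega) _h

-- one step of `cands = [(q * p ** a, ok or 3 * a > e) for q, ok in cands for a in range(e // 2 + 1)]`
-- (a ≥ 0 on the range, so p ** a is p ^ a.toNat)
def pvBStep (cands : List (Int × Bool)) (p e : Int) : List (Int × Bool) :=
  cands.flatMap (fun c =>
    (PySem.List.pyRange 0 (PySem.Int.floordiv e 2 + 1) 1).map
      (fun a => (c.1 * p ^ a.toNat, c.2 || decide (3 * a > e))))

def get_q_numbers_factorization_alt (n : Int) : List Int :=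
  let r := pvFactB n 2 []
  let pairs := if 1 < r.1 then r.2 ++ [(r.1, 1)] else r.2      -- `if num > 1: pairs.append((num, 1))`
  let cands := pairs.foldl (fun cands pe => pvBStep cands pe.1 pe.2) [(1, false)]
  PySem.List.sorted ((cands.filter (fun c => c.2)).map (fun c => c.1)) (fun x => x) false

-- ===== PRECONDITION & SPEC =====
def Spec_get_q_numbers_factorization (n : Int) (out : List Int) : Prop := out = get_q_numbers_factorization_alt n
instance (n : Int) (out : List Int) : Decidable (Spec_get_q_numbers_factorization n out) := by unfold Spec_get_q_numbers_factorization; infer_instance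

-- ===== CLAIM (what is proved, stated in full; the proofs are below) =====
def Claim_equal_get_q_numbers_factorization : Prop := ∀ (n : Int), Dom_get_q_numbers_factorization n → Spec_get_q_numbers_factorization n (get_q_numbers_factorization n)

-- ===== LEMMAS AND PROOFS =====

-- ---- phase-1 correspondence: A's dict factorize and B's pair-list factorize ----

-- the strip count only grows
theorem pvStripB_snd_ge (num d e : Int) : e ≤ (pvStripB num d e).2 := by
  induction num, e using pvStripB.induct d with
  | case1 num e h ih => rw [pvStripB, dif_pos h]; omega
  | case2 num e h => rw [pvStripB, dif_neg h]

-- A's dict inner loop = B's counted inner loop, as one repeated insert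
theorem pvDivOut_eq_strip (d : Int) (num e : Int) (fs : PySem.Dict Int Int) :
    pvDivOut num d fs
      = ((pvStripB num d e).1,
         if (pvStripB num d e).2 = e then fs
         else fs.insert d (fs.getD d 0 + ((pvStripB num d e).2 - e))) := by
  induction num, e using pvStripB.induct d generalizing fs with
  | case1 num e h ih =>
    rw [pvDivOut, dif_pos h, pvStripB, dif_pos h]
    rw [ih (fs.insert d (fs.getD d 0 + 1))]
    have hge := pvStripB_snd_ge (PySem.Int.floordiv num d) d (e + 1)
    rcases eq_or_lt_of_le hge with heq | hlt
    · rw [if_pos heq.symm, if_neg (by omega), ← heq]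
      simp
    · rw [if_neg (by omega), if_neg (by omega),
        PySem.Dict.getD_insert_self, PySem.Dict.insert_insert_self]
      ring_nf
  | case2 num e h =>
    rw [pvDivOut, dif_neg h, pvStripB, dif_neg h]
    simp

-- properties of the strip result (positivity, divisibility, fully stripped)
theorem pvStripB_props (d : Int) (num e : Int) (h0 : 0 < num) (h2 : 2 ≤ d) :
    0 < (pvStripB num d e).1 ∧ (pvStripB num d e).1 ∣ num ∧
      ¬ (d ∣ (pvStripB num d e).1) := by
  induction num, e using pvStripB.induct d with
  | case1 num e h ih =>
    rw [pvStripB, dif_pos h]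
    have hdvd : d ∣ num := (PySem.Int.mod_eq_zero_iff_dvd num d).mp h.1
    have hexact : num = d * PySem.Int.floordiv num d := by
      have := PySem.Int.floordiv_mul_add_mod num d
      rw [h.1] at this; linarith [this]
    have hpos : 0 < PySem.Int.floordiv num d := by nlinarith [hexact]
    obtain ⟨p1, p2, p3⟩ := ih hpos
    exact ⟨p1, p2.trans ⟨d, by linarith [hexact]⟩, p3⟩
  | case2 num e h =>
    rw [pvStripB, dif_neg h]
    refine ⟨h0, dvd_refl num, fun hd => ?_⟩
    exact h ⟨(PySem.Int.mod_eq_zero_iff_dvd num d).mpr hd, h0, h2⟩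

-- MAIN phase-1 lemma: A's outer loop and B's outer loop walk in lockstep; along the way the
-- dict keys stay < d, ≥ 2, nodup and non-divisors of the cofactor (so inserts always append)
theorem pvFactLoop_eq_factB (num d : Int) (fs : PySem.Dict Int Int)
    (h2 : 2 ≤ d) (hnd : fs.keys.Nodup)
    (hinv : ∀ kv ∈ fs.items, 2 ≤ kv.1 ∧ 0 ≤ kv.2 ∧ kv.1 < d ∧ (0 < num → ¬ (kv.1 ∣ num))) :
    (pvFactLoop num d fs).1 = (pvFactB num d fs.items).1 ∧
    (pvFactLoop num d fs).2.items = (pvFactB num d fs.items).2 ∧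
    (pvFactLoop num d fs).2.keys.Nodup ∧
    (∀ kv ∈ (pvFactLoop num d fs).2.items,
        2 ≤ kv.1 ∧ 0 ≤ kv.2 ∧
          (0 < (pvFactLoop num d fs).1 → ¬ (kv.1 ∣ (pvFactLoop num d fs).1))) := by
  induction num, d, fs using pvFactLoop.induct with
  | case1 num d fs h r ih =>
    simp only [dite_eq_ite] at ih
    rw [pvFactLoop, dif_pos h, pvFactB, dif_pos h]
    have hpos : 0 < num := by nlinarith [h.1, h.2]
    obtain ⟨hp1, hp2, hp3⟩ := pvStripB_props d num 0 hpos h.2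
    have hsnn : (0:Int) ≤ (pvStripB num d 0).2 := pvStripB_snd_ge num d 0
    have hdstep : (d + if d = 2 then 1 else 2) = (if d = 2 then 3 else d + 2) := by
      split <;> omega
    -- d is fresh in fs
    have hfresh : fs.contains d = false := by
      by_contra hc
      have hm : d ∈ fs.keys := (PySem.Dict.contains_iff_mem_keys fs d).mp (by
        cases hcc : fs.contains d
        · exact absurd hcc hc
        · rfl)
      obtain ⟨v, hkv⟩ : ∃ x, (d, x) ∈ fs.items := by
        simpa [PySem.Dict.keys] using hm
      have := (hinv (d, v) hkv).2.2.1
      omega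
    have hdiv := pvDivOut_eq_strip d num 0 fs
    set s := pvStripB num d 0 with hs
    -- the items of the dict after the inner loop
    have hitems : (pvDivOut num d fs).2.items
        = (if s.2 ≠ 0 then fs.items ++ [(d, s.2)] else fs.items) := by
      rw [hdiv]
      by_cases hz : s.2 = 0
      · simp [hz]
      · rw [if_neg hz, if_pos hz]
        rw [sub_zero, PySem.Dict.items_insert_of_not_contains _ _ hfresh,
          PySem.Dict.getD_of_not_contains _ _ hfresh, zero_add]
    have hfst : (pvDivOut num d fs).1 = s.1 := by rw [hdiv]
    -- invariants for the recursive call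
    have hnd' : (pvDivOut num d fs).2.keys.Nodup := by
      rw [hdiv]
      split
      · exact hnd
      · exact PySem.Dict.nodup_keys_insert fs d _ hnd
    have hinv' : ∀ kv ∈ (pvDivOut num d fs).2.items,
        2 ≤ kv.1 ∧ 0 ≤ kv.2 ∧ kv.1 < d + (if d = 2 then 1 else 2) ∧
          (0 < (pvDivOut num d fs).1 → ¬ (kv.1 ∣ (pvDivOut num d fs).1)) := by
      intro kv hkv
      rw [hitems] at hkv
      rw [hfst]
      by_cases hz : s.2 = 0
      · rw [if_neg (by simpa using hz)] at hkv
        obtain ⟨k1, k2, k3, k4⟩ := hinv kv hkv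
        refine ⟨k1, k2, by split <;> omega, fun _ hdv => k4 hpos (hdv.trans hp2)⟩
      · rw [if_pos hz] at hkv
        rcases List.mem_append.mp hkv with hkv | hkv
        · obtain ⟨k1, k2, k3, k4⟩ := hinv kv hkv
          refine ⟨k1, k2, by split <;> omega, fun _ hdv => k4 hpos (hdv.trans hp2)⟩
        · have : kv = (d, s.2) := by simpa using hkv
          subst this
          exact ⟨h.2, hsnn, by split <;> omega, fun _ hdv => hp3 hdv⟩
    have ihx := ih (by split <;> omega) hnd' hinv'
    have hrr : r = pvDivOut num d fs := rfl
    rw [hrr, hfst, hitems, hdstep] at ihx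
    simp only [hfst, hdstep]
    exact ihx
  | case2 num d fs h =>
    rw [pvFactLoop, dif_neg h, pvFactB, dif_neg h]
    exact ⟨rfl, rfl, hnd, fun kv hkv =>
      ⟨(hinv kv hkv).1, (hinv kv hkv).2.1, fun hp => (hinv kv hkv).2.2.2 hp⟩⟩

-- the full pair lists agree: A's factorize items = B's phase-1 pairs
theorem pvFactorize_items_eq (n : Int) :
    (pvFactorize n).items
      = (if 1 < (pvFactB n 2 []).1
          then (pvFactB n 2 []).2 ++ [((pvFactB n 2 []).1, 1)] else (pvFactB n 2 []).2) := by
  have hempty : (PySem.Dict.empty : PySem.Dict Int Int).items = [] := rfl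
  obtain ⟨c1, c2, c3, c4⟩ := pvFactLoop_eq_factB n 2 PySem.Dict.empty (by omega)
    (by simp [PySem.Dict.keys, hempty]) (by simp [hempty])
  rw [hempty] at c1 c2
  simp only [pvFactorize]
  set r := pvFactLoop n 2 PySem.Dict.empty with hr
  by_cases h1 : 1 < r.1
  · rw [if_pos h1, if_pos (by rw [← c1]; exact h1)]
    -- the remaining cofactor is a fresh key
    have hfresh : r.2.contains r.1 = false := by
      by_contra hc
      have hmem : r.1 ∈ r.2.keys := (PySem.Dict.contains_iff_mem_keys r.2 r.1).mp (by
        cases hcc : r.2.contains r.1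
        · exact absurd hcc hc
        · rfl)
      obtain ⟨v, hkv⟩ : ∃ x, (r.1, x) ∈ r.2.items := by
        simpa [PySem.Dict.keys] using hmem
      exact (c4 (r.1, v) hkv).2.2 (by omega) (dvd_refl r.1)
    rw [PySem.Dict.items_insert_of_not_contains _ _ hfresh,
      PySem.Dict.getD_of_not_contains _ _ hfresh, c2, c1]
    norm_num
  · rw [if_neg h1, if_neg (by rw [← c1]; exact h1), c2]

-- ---- phase-2 correspondence (A's recursion = the flag fold), as before ----

-- B's candidate fold, as a function of the starting candidate list (proof-side view)
def pvBFold (items : List (Int × Int)) (cs : List (Int × Bool)) : List (Int × Bool) :=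
  items.foldl (fun cands pe => pvBStep cands pe.1 pe.2) cs

theorem pvBFold_nil (items : List (Int × Int)) : pvBFold items [] = [] := by
  induction items with
  | nil => rfl
  | cons pe rest ih => simpa [pvBFold, pvBStep] using ih

theorem pvBFold_append (items : List (Int × Int)) (cs₁ cs₂ : List (Int × Bool)) :
    pvBFold items (cs₁ ++ cs₂) = pvBFold items cs₁ ++ pvBFold items cs₂ := by
  induction items generalizing cs₁ cs₂ with
  | nil => rfl
  | cons pe rest ih =>
    simp only [pvBFold, List.foldl_cons, pvBStep, List.flatMap_append] at *
    exact ih _ _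

theorem pvBFold_flatMap (items : List (Int × Int)) (cs : List (Int × Bool)) :
    pvBFold items cs = cs.flatMap (fun c => pvBFold items [c]) := by
  induction cs with
  | nil => simp [pvBFold_nil]
  | cons c cs ih =>
    have : c :: cs = [c] ++ cs := rfl
    rw [this, pvBFold_append, ih]
    simp

-- the leaf `any` over indices equals the `any` over the zipped lists (Nat-index form first)
theorem pvAny_range_eq_zip_nat (as es : List Int) (h : as.length = es.length) :
    ((List.range es.length).any (fun k => decide (3 * as.getD k 0 > es.getD k 0)))
    = (as.zip es).any (fun ae => decide (3 * ae.1 > ae.2)) := by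
  induction es generalizing as with
  | nil =>
    have : as = [] := List.eq_nil_of_length_eq_zero h
    simp [this]
  | cons e es ih =>
    match as, h with
    | a :: as, h =>
      rw [List.length_cons, List.range_succ_eq_map]
      simp only [List.any_cons, List.any_map, Function.comp_def, List.getD_cons_succ,
        List.getD_cons_zero, List.zip_cons_cons]
      rw [ih as (by simpa using h)]

theorem pvAny_range_eq_zip (as es : List Int) (h : as.length = es.length) :
    ((PySem.List.pyRange 0 (es.length : Int) 1).any
      (fun i => decide (3 * PySem.List.pyGetD as i 0 > PySem.List.pyGetD es i 0)))
    = (as.zip es).any (fun ae => decide (3 * ae.1 > ae.2)) := by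
  rw [PySem.List.pyRange_one]
  simp only [sub_zero, Int.toNat_natCast, List.any_map, Function.comp_def, zero_add,
    PySem.List.pyGetD_natCast]
  exact pvAny_range_eq_zip_nat as es h

-- MAIN phase-2 lemma: A's recursion from an arbitrary point = B's fold from one seeded candidate
theorem pvGenQ_eq_bfold (items : List (Int × Int)) (exps0 curA : List Int) (q : Int)
    (h : curA.length = exps0.length) :
    pvGenQ (items.map (fun pe => (pe.1, PySem.Int.floordiv pe.2 2)))
        (exps0 ++ items.map Prod.snd) q curA
    = ((pvBFold items [(q, (curA.zip exps0).any (fun ae => decide (3 * ae.1 > ae.2)))]).filter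
        (fun c => c.2)).map (fun c => c.1) := by
  induction items generalizing exps0 curA q with
  | nil =>
    simp only [List.map_nil, List.append_nil, pvGenQ]
    rw [pvAny_range_eq_zip curA exps0 h]
    cases hok : (curA.zip exps0).any (fun ae => decide (3 * ae.1 > ae.2)) <;>
      simp [pvBFold]
  | cons pe rest ih =>
    obtain ⟨p, e⟩ := pe
    simp only [List.map_cons, pvGenQ]
    rw [← List.flatMap_eq_foldl]
    have hR : pvBFold ((p, e) :: rest)
        [(q, (curA.zip exps0).any (fun ae => decide (3 * ae.1 > ae.2)))]
        = (PySem.List.pyRange 0 (PySem.Int.floordiv e 2 + 1) 1).flatMap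
            (fun a => pvBFold rest
              [(q * p ^ a.toNat,
                ((curA.zip exps0).any (fun ae => decide (3 * ae.1 > ae.2))
                  || decide (3 * a > e)))]) := by
      show pvBFold rest (pvBStep _ p e) = _
      rw [pvBFold_flatMap]
      simp [pvBStep, List.flatMap_map]
    rw [hR, List.filter_flatMap, List.map_flatMap]
    congr 1
    funext a
    have hzip : ((curA ++ [a]).zip (exps0 ++ [e])).any (fun ae => decide (3 * ae.1 > ae.2))
        = ((curA.zip exps0).any (fun ae => decide (3 * ae.1 > ae.2)) || decide (3 * a > e)) := by
      rw [List.zip_append h]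
      simp
    have hE : exps0 ++ e :: rest.map Prod.snd = (exps0 ++ [e]) ++ rest.map Prod.snd := by simp
    rw [hE, ih (exps0 ++ [e]) (curA ++ [a]) (q * p ^ a.toNat) (by simp [h]), hzip]

-- flag invariant: a candidate whose flag is set is ≥ 2 (so 1 is never in the output)
theorem pvBFold_flag (items : List (Int × Int)) (cs : List (Int × Bool))
    (hitems : ∀ pe ∈ items, 2 ≤ pe.1 ∧ 0 ≤ pe.2)
    (hcs : ∀ c ∈ cs, 1 ≤ c.1 ∧ (c.2 = true → 2 ≤ c.1)) :
    ∀ c ∈ pvBFold items cs, 1 ≤ c.1 ∧ (c.2 = true → 2 ≤ c.1) := by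
  induction items generalizing cs with
  | nil => exact hcs
  | cons pe rest ih =>
    obtain ⟨p, e⟩ := pe
    obtain ⟨hp, he⟩ := hitems (p, e) (by simp)
    refine ih (pvBStep cs p e) (fun pe hpe => hitems pe (by simp [hpe])) ?_
    intro c hc
    simp only [pvBStep, List.mem_flatMap, List.mem_map] at hc
    obtain ⟨c0, hc0, a, ha, rfl⟩ := hc
    obtain ⟨hc1, hc2⟩ := hcs c0 hc0
    have hann := (PySem.List.mem_pyRange_one.mp ha).1
    have hpow : (1 : Int) ≤ p ^ a.toNat := one_le_pow₀ (by omega)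
    constructor
    · nlinarith
    · simp only [Bool.or_eq_true, decide_eq_true_eq]
      rintro (hfl | hgt)
      · have := hc2 hfl; nlinarith
      · have ha1 : 1 ≤ a.toNat := by omega
        have : p ^ 1 ≤ p ^ a.toNat := pow_le_pow_right₀ (by omega) ha1
        simp only [pow_one] at this
        nlinarith

-- the items of A's factorize dict are primes ≥ 2 with nonnegative exponents
theorem pvFactorize_inv (n : Int) :
    ∀ pe ∈ (pvFactorize n).items, 2 ≤ pe.1 ∧ 0 ≤ pe.2 := by
  have hempty : (PySem.Dict.empty : PySem.Dict Int Int).items = [] := rfl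
  obtain ⟨c1, c2, c3, c4⟩ := pvFactLoop_eq_factB n 2 PySem.Dict.empty (by omega)
    (by simp [PySem.Dict.keys, hempty]) (by simp [hempty])
  rw [hempty] at c1 c2
  intro pe hpe
  rw [pvFactorize_items_eq n, ← c1, ← c2] at hpe
  set r := pvFactLoop n 2 PySem.Dict.empty with hr
  by_cases h1 : 1 < r.1
  · rw [if_pos h1] at hpe
    rcases List.mem_append.mp hpe with hpe | hpe
    · exact ⟨(c4 pe hpe).1, (c4 pe hpe).2.1⟩
    · have : pe = (r.1, 1) := by simpa using hpe
      subst this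
      exact ⟨by omega, by norm_num⟩
  · rw [if_neg h1] at hpe
    exact ⟨(c4 pe hpe).1, (c4 pe hpe).2.1⟩

-- A's pre-sort result list equals B's pre-sort candidate list (over A's factorize items)
theorem pvResult_eq (n : Int) :
    pvGenQ (((pvFactorize n).keys).zip (((pvFactorize n).values).map
        (fun e => PySem.Int.floordiv e 2))) ((pvFactorize n).values) 1 []
    = ((pvBFold (pvFactorize n).items [(1, false)]).filter (fun c => c.2)).map (fun c => c.1) := by
  have h := pvGenQ_eq_bfold (pvFactorize n).items [] [] 1 rfl
  simp only [List.nil_append, List.zip_nil_right, List.any_nil] at h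
  have hk : (pvFactorize n).keys = (pvFactorize n).items.map Prod.fst := rfl
  have hv : (pvFactorize n).values = (pvFactorize n).items.map Prod.snd := rfl
  rw [hk, hv, List.map_map, List.zip_map']
  exact h

-- 1 never appears in the candidate output, so A's removal step is a no-op
theorem pvOne_not_mem (n : Int) :
    (((pvBFold (pvFactorize n).items [(1, false)]).filter (fun c => c.2)).map
      (fun c => c.1)).contains 1 = false := by
  have hflag := pvBFold_flag (pvFactorize n).items [(1, false)] (pvFactorize_inv n) (by simp)
  simp only [List.contains_eq_mem, decide_eq_false_iff_not, List.mem_map, List.mem_filter]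
  rintro ⟨c, ⟨hc, hc2⟩, hc1⟩
  have := (hflag c hc).2 hc2
  omega

theorem pvMain (n : Int) : get_q_numbers_factorization n = get_q_numbers_factorization_alt n := by
  simp only [get_q_numbers_factorization, get_q_numbers_factorization_alt]
  rw [show (if 1 < (pvFactB n 2 []).1
        then (pvFactB n 2 []).2 ++ [((pvFactB n 2 []).1, 1)] else (pvFactB n 2 []).2)
      = (pvFactorize n).items from (pvFactorize_items_eq n).symm]
  by_cases hemp : (pvFactorize n).items = []
  · rw [if_pos hemp, hemp]; rfl
  · rw [if_neg hemp, pvResult_eq n]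
    rw [show ((pvFactorize n).items.foldl (fun cands pe => pvBStep cands pe.1 pe.2) [(1, false)])
        = pvBFold (pvFactorize n).items [(1, false)] from rfl]
    rw [pvOne_not_mem n]
    simp

-- ===== VERDICT (by name: the statement is the Claim_ definition above) =====
theorem get_q_numbers_factorization_spec : Claim_equal_get_q_numbers_factorization := by
  intro n _
  unfold Spec_get_q_numbers_factorization
  exact pvMain n
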